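-- pv_equiv track=rewrite | github.com/Ry4nW/python-wars | Codewars/6kyu/missingArray.py | get_length_of_missing_array
-- ===== SOURCE A (Python) =====
-- def get_length_of_missing_array(arr):
--
--     if len(arr) == 0:
--         return 0
--     else:
--
--         lens = []
--
--         for i in arr:
--             if i == None or len(i) == 0:
--                 return 0
--
--             lens.append(len(i))
--
--
--         lens.sort()
--         prevInt = 0
--
--         for i in lens:
--             if (prevInt == 0):
--                 prevInt = i
--                 continue
--
--             if (i - 1 > prevInt):
--                 return prevInt + 1
--
--             prevInt = i
--
--     return 0
-- ===== SOURCE B (Python) =====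
-- def get_length_of_missing_array(arr):
--     if len(arr) == 0:
--         return 0
--     lengths = set()
--     for i in arr:
--         if i == None or len(i) == 0:
--             return 0
--         lengths.add(len(i))
--     lo = min(lengths)
--     hi = max(lengths)
--     for v in range(lo, hi + 1):
--         if v not in lengths:
--             return v
--     return 0
-- ===== Notes on version B (the rewrite author's own statement) =====
-- stated objective: alternative
-- what changed: Replaces sort-then-adjacent-gap scan with a set of lengths plus a linear scan of the value range [min,max] returning the first value absent from the set.
import Mathlib
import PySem

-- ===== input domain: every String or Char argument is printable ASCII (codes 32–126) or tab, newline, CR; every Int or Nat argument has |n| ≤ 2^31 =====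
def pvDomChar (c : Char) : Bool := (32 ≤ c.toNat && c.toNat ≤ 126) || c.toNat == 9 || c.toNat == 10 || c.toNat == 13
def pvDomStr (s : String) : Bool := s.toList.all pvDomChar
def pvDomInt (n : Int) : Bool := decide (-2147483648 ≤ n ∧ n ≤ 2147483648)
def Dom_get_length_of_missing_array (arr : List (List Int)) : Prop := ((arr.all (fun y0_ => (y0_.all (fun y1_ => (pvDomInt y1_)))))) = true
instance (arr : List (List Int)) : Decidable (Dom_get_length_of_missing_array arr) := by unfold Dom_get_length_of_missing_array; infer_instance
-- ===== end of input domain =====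

-- One honest line: B replaces A's sort-then-adjacent-gap scan by a set of lengths
-- and a scan of the value range [min, max] for the first absent value (alternative algorithm, same cost class).

-- ===== PORT A =====
-- the 'for i in arr' loop building lens, with the early 'return 0' as none
def pvLensA : List (List Int) → List Int → Option (List Int)
  | [], acc => some acc
  | i :: rest, acc =>
    if i.length = 0 then none
    else pvLensA rest (acc ++ [(i.length : Int)])

-- the 'for i in lens' loop with prevInt
def pvScanA : Int → List Int → Int
  | _, [] => 0
  | prev, i :: t =>
    if prev = 0 then pvScanA i t
    else if i - 1 > prev then prev + 1
    else pvScanA i t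

def get_length_of_missing_array (arr : List (List Int)) : Int :=
  if arr.length = 0 then 0
  else
    match pvLensA arr [] with
    | none => 0
    | some lens => pvScanA 0 (PySem.List.sorted lens (fun x => x) false)

-- ===== PORT B =====
-- the 'for i in arr' loop building the set 'lengths', early 'return 0' as none
def pvLensB : List (List Int) → PySem.Set Int → Option (PySem.Set Int)
  | [], s => some s
  | i :: rest, s =>
    if i.length = 0 then none
    else pvLensB rest (PySem.Set.add s (i.length : Int))

def get_length_of_missing_array_alt (arr : List (List Int)) : Int :=
  if arr.length = 0 then 0
  else
    match pvLensB arr PySem.Set.empty with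
    | none => 0
    | some s =>
      match PySem.List.min? s (fun x => x), PySem.List.max? s (fun x => x) with
      | some lo, some hi =>
        -- 'for v in range(lo, hi+1): if v not in lengths: return v' then 'return 0'
        match (PySem.List.pyRange lo (hi + 1) 1).find? (fun v => !(PySem.Set.contains s v)) with
        | some v => v
        | none => 0
      | _, _ => 0   -- unreachable: the set is nonempty here (arr ≠ [] and every element nonempty)

-- ===== PRECONDITION & SPEC =====
def Spec_get_length_of_missing_array (arr : List (List Int)) (out : Int) : Prop := out = get_length_of_missing_array_alt arr
instance (arr : List (List Int)) (out : Int) : Decidable (Spec_get_length_of_missing_array arr out) := by unfold Spec_get_length_of_missing_array; infer_instance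

-- ===== CLAIM (what is proved, stated in full; the proofs are below) =====
def Claim_equal_get_length_of_missing_array : Prop := ∀ (arr : List (List Int)), Dom_get_length_of_missing_array arr → Spec_get_length_of_missing_array arr (get_length_of_missing_array arr)

-- ===== LEMMAS AND PROOFS =====

theorem pvLensA_none_iff (arr : List (List Int)) (acc : List Int) :
    pvLensA arr acc = none ↔ [] ∈ arr := by
  induction arr generalizing acc with
  | nil => simp [pvLensA]
  | cons i rest ih =>
    by_cases h : i.length = 0
    · have hi : i = [] := List.length_eq_zero_iff.mp h
      simp [pvLensA, hi]
    · have hi : i ≠ [] := fun e => h (by simp [e])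
      simp [pvLensA, h, ih, show ¬([] = i) from fun e => hi e.symm]

theorem pvLensB_none_iff (arr : List (List Int)) (s : PySem.Set Int) :
    pvLensB arr s = none ↔ [] ∈ arr := by
  induction arr generalizing s with
  | nil => simp [pvLensB]
  | cons i rest ih =>
    by_cases h : i.length = 0
    · have hi : i = [] := List.length_eq_zero_iff.mp h
      simp [pvLensB, hi]
    · have hi : i ≠ [] := fun e => h (by simp [e])
      simp [pvLensB, h, ih, show ¬([] = i) from fun e => hi e.symm]

theorem pvLensA_some (arr : List (List Int)) (acc : List Int)
    (h : ∀ i ∈ arr, i.length ≠ 0) :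
    pvLensA arr acc = some (acc ++ arr.map (fun i => (i.length : Int))) := by
  induction arr generalizing acc with
  | nil => simp [pvLensA]
  | cons i rest ih =>
    have hi : i.length ≠ 0 := h i (by simp)
    simp [pvLensA, hi, ih _ (fun j hj => h j (by simp [hj]))]

theorem pvLensB_some (arr : List (List Int)) (s : PySem.Set Int)
    (h : ∀ i ∈ arr, i.length ≠ 0) :
    pvLensB arr s = some ((arr.map (fun i => (i.length : Int))).foldl PySem.Set.add s) := by
  induction arr generalizing s with
  | nil => simp [pvLensB]
  | cons i rest ih =>
    have hi : i.length ≠ 0 := h i (by simp)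
    simp [pvLensB, hi, ih _ (fun j hj => h j (by simp [hj]))]

-- core: A's gap scan over the sorted tail equals the first value missing from L in (p, M]
theorem pvScan_core (t : List Int) (p M : Int) (L : List Int)
    (hsorted : (t).Pairwise (· ≤ ·)) (hge : ∀ y ∈ t, p ≤ y) (hp : 0 < p)
    (hmem : ∀ v, p < v → (v ∈ L ↔ v ∈ t))
    (hML : M ∈ L) (hmax : ∀ y ∈ L, y ≤ M) :
    pvScanA p t =
      (((PySem.List.pyRange (p + 1) (M + 1) 1).find? (fun v => !(decide (v ∈ L)))).getD 0) := by
  induction t generalizing p with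
  | nil =>
    have hMp : M ≤ p := by
      by_contra hlt
      exact absurd ((hmem M (by omega)).mp hML) (by simp)
    rw [PySem.List.pyRange_one_eq_nil (by omega)]
    simp [pvScanA]
  | cons i t ih =>
    have hpi : p ≤ i := hge i (by simp)
    have hti : ∀ y ∈ t, i ≤ y := fun y hy => List.rel_of_pairwise_cons hsorted hy
    by_cases hgap : i - 1 > p
    · -- gap: A returns p+1, and p+1 is the first missing value
      have hiL : i ∈ L := (hmem i (by omega)).mpr (by simp)
      have hiM : i ≤ M := hmax i hiL
      have hnot : (p + 1) ∉ L := by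
        intro hin
        rcases List.mem_cons.mp ((hmem (p + 1) (by omega)).mp hin) with h | h
        · omega
        · exact absurd (hti _ h) (by omega)
      rw [PySem.List.pyRange_one_cons (by omega)]
      simp [pvScanA, hp.ne', hgap, hnot]
    · -- no gap: i = p or i = p + 1; A steps on, B's scan starts at the same next candidate
      have hmem' : ∀ v, i < v → (v ∈ L ↔ v ∈ t) := by
        intro v hv
        rw [hmem v (by omega)]
        constructor
        · intro h
          rcases List.mem_cons.mp h with h | h
          · omega
          · exact h
        · intro h; exact List.mem_cons_of_mem _ h
      have hrec := ih i (List.Pairwise.of_cons hsorted) hti (by omega) hmem'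
      have hstep : pvScanA p (i :: t) = pvScanA i t := by
        simp [pvScanA, hp.ne', hgap]
      rw [hstep, hrec]
      rcases (by omega : i = p ∨ i = p + 1) with h | h
      · rw [h]
      · -- i = p+1 is present in L, so the range scan skips it
        have hiL : i ∈ L := (hmem i (by omega)).mpr (by simp)
        have hiM : i ≤ M := hmax i hiL
        subst h
        conv_rhs => rw [PySem.List.pyRange_one_cons (show p + 1 < M + 1 by omega)]
        simp [hiL]

-- ===== VERDICT (by name: the statement is the Claim_ definition above) =====
theorem get_length_of_missing_array_spec : Claim_equal_get_length_of_missing_array := by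
  intro arr _
  unfold Spec_get_length_of_missing_array get_length_of_missing_array get_length_of_missing_array_alt
  by_cases harr : arr.length = 0
  · simp [harr]
  · simp only [harr, if_false]
    by_cases hz : [] ∈ arr
    · rw [(pvLensA_none_iff arr []).mpr hz, (pvLensB_none_iff arr _).mpr hz]
    · have hz' : ∀ i ∈ arr, i.length ≠ 0 := by
        intro i hi hlen
        exact hz (List.length_eq_zero_iff.mp hlen ▸ hi)
      rw [pvLensA_some arr [] hz', pvLensB_some arr _ hz']
      simp only [List.nil_append]
      set L : List Int := arr.map (fun i => (i.length : Int)) with hL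
      have hSet : (L.foldl PySem.Set.add PySem.Set.empty) = PySem.Set.ofList L := by
        rw [PySem.Set.ofList_eq_foldl]; rfl
      rw [hSet]
      -- L is nonempty and all its elements are positive
      have hLne : L ≠ [] := by
        simp only [hL, ne_eq, List.map_eq_nil_iff]
        intro h; exact harr (by simp [h])
      have hLpos : ∀ y ∈ L, 0 < y := by
        intro y hy
        simp only [hL, List.mem_map] at hy
        obtain ⟨i, hi, rfl⟩ := hy
        exact_mod_cast Nat.pos_of_ne_zero (hz' i hi)
      -- the sorted list is nonempty
      obtain ⟨h0, t, hs⟩ : ∃ h0 t, PySem.List.sorted L (fun x => x) false = h0 :: t := by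
        rcases hsl : PySem.List.sorted L (fun x => x) false with _ | ⟨h0, t⟩
        · have hperm := PySem.List.sorted_perm L (fun x => x) false
          rw [hsl] at hperm
          exact absurd hperm.symm.eq_nil hLne
        · exact ⟨h0, t, rfl⟩
      have hperm : (h0 :: t).Perm L := hs ▸ PySem.List.sorted_perm L (fun x => x) false
      have hmemL : ∀ v, v ∈ L ↔ v ∈ h0 :: t := fun v => (hperm.mem_iff).symm
      have hhead : ∀ y ∈ L, h0 ≤ y := PySem.List.key_head_sorted_le L (fun x => x) hs
      have hpair : (h0 :: t).Pairwise (· ≤ ·) := by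
        have := PySem.List.sorted_pairwise L (fun x => x)
        rw [hs] at this
        exact this
      have hh0L : h0 ∈ L := (hmemL h0).mpr (by simp)
      have hh0pos : 0 < h0 := hLpos h0 hh0L
      -- min / max of the set
      set S := PySem.Set.ofList L with hSdef
      have hmemS : ∀ v, v ∈ S ↔ v ∈ L := fun v => PySem.Set.mem_ofList L v
      have hmin : PySem.List.min? S (fun x => x) = some h0 := by
        rcases hm : PySem.List.min? S (fun x => x) with _ | m
        · rw [PySem.List.min?_eq_none_iff] at hm
          exact absurd ((hmemS h0).mpr hh0L) (by rw [hm]; simp)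
        · have h1 : m ≤ h0 := PySem.List.min?_isMin hm h0 ((hmemS h0).mpr hh0L)
          have h2 : h0 ≤ m := hhead m ((hmemS m).mp (PySem.List.min?_mem hm))
          rw [show m = h0 by omega]
      rcases hM : PySem.List.max? S (fun x => x) with _ | M
      · rw [PySem.List.max?_eq_none_iff] at hM
        exact absurd ((hmemS h0).mpr hh0L) (by rw [hM]; simp)
      have hMS : M ∈ L := (hmemS M).mp (PySem.List.max?_mem hM)
      have hMmax : ∀ y ∈ L, y ≤ M := fun y hy => PySem.List.max?_isMax hM y ((hmemS y).mpr hy)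
      rw [hs, hmin]
      simp only []
      -- the contains test is membership in L
      have hpred : (fun v => !(PySem.Set.contains S v)) = (fun v => !(decide (v ∈ L))) := by
        funext v
        congr 1
        rw [Bool.eq_iff_iff, PySem.Set.contains_iff, hmemS v, decide_eq_true_iff]
      rw [hpred]
      -- A's scan: first step consumes h0 (the prevInt = 0 branch)
      have hA : pvScanA 0 (h0 :: t) = pvScanA h0 t := by simp [pvScanA]
      rw [hA]
      rw [pvScan_core t h0 M L (List.Pairwise.of_cons hpair)
        (fun y hy => List.rel_of_pairwise_cons hpair hy) hh0pos
        (by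
          intro v hv
          rw [hmemL v]
          constructor
          · intro h
            rcases List.mem_cons.mp h with h | h
            · omega
            · exact h
          · intro h; exact List.mem_cons_of_mem _ h)
        hMS hMmax]
      -- B's scan skips its first candidate h0, which is in L
      have hh0M : h0 ≤ M := hMmax h0 hh0L
      conv_rhs => rw [PySem.List.pyRange_one_cons (show h0 < M + 1 by omega)]
      simp only [List.find?_cons, hh0L, decide_true, Bool.not_true]
      cases (PySem.List.pyRange (h0 + 1) (M + 1) 1).find? (fun v => !(decide (v ∈ L))) <;> simp
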